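-- pv_equiv track=rewrite | github.com/kemper/openscad_projects | scripts/bambu_3mf.py | encode_paint_color
-- ===== SOURCE A (Python) =====
-- def encode_paint_color(state):
--     """Encode a TriangleSelector state as a Bambu paint_color attribute string.
--
--     State 0 = default extruder (omit attribute).
--     State 1..N = explicitly assign to extruder 1..N.
--
--     The encoding is a reversed hex-nibble string representing a quadtree leaf:
--       - 4 bits per nibble (LSB-first): split_sides(2), state(2)
--       - For states 0-2: single nibble (0, 4, 8)
--       - For states 3+: marker nibble C + extension nibble(s)
--     """
--     if state == 0:
--         return ""
--     if state <= 2: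
--         # Direct leaf: split_sides=0 (00), state in 2 bits
--         # LSB-first nibble: bit0=split_lo, bit1=split_hi, bit2=state_lo, bit3=state_hi
--         nibble = (state & 1) * 4 + ((state >> 1) & 1) * 8
--         return format(nibble, "X")
--
--     # Extended: initial nibble has state=3 marker (C), then extension nibble(s)
--     # Extended value = actual_state - 3
--     ext_value = state - 3
--     nibbles = ["C"]
--     while ext_value >= 15:
--         nibbles.append("F")
--         ext_value -= 15
--     nibbles.append(format(ext_value, "X"))
--     # Bambu reverses the nibble string (characters are prepended during serialization)
--     return "".join(reversed(nibbles))
-- ===== SOURCE B (Python) =====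
-- def encode_paint_color(state):
--     if state == 0:
--         return ""
--     if state <= 2:
--         nibble = (state & 1) * 4 + ((state >> 1) & 1) * 8
--         return format(nibble, "X")
--     # closed form: q 'F' markers and a remainder nibble instead of the subtraction loop
--     q, r = divmod(state - 3, 15)
--     return format(r, "X") + "F" * q + "C"
-- ===== Notes on version B (the rewrite author's own statement) =====
-- stated objective: simpler
-- what changed: The subtraction while-loop that counts 'F' nibbles and the list/reverse/join assembly are replaced by a divmod closed form that builds the reversed string directly.
import Mathlib
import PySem

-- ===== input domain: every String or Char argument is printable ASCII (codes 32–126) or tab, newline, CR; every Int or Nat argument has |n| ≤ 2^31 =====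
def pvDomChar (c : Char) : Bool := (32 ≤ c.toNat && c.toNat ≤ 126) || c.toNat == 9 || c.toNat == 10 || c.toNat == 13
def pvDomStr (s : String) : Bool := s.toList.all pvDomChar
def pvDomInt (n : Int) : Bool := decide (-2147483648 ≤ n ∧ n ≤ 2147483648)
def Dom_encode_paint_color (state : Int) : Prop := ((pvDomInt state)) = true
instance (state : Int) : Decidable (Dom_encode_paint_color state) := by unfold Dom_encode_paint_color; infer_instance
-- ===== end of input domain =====

-- B replaces A's subtraction loop and reverse/join assembly by a divmod closed form (simpler).


-- ===== PORT A =====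
-- format(n, "X") as a single hex digit character: exact for 0 ≤ n ≤ 15, which covers every use in both ports
def fmtXc (n : Int) : Char :=
  Char.ofNat (if n < 10 then 48 + n.toNat else 55 + n.toNat)

-- format(n, "X") as a string (each nibble in the Python is a one-character string)
def fmtX (n : Int) : String :=
  String.ofList [fmtXc n]

-- the 'while ext_value >= 15' loop of A; the one-char nibble strings are carried as Chars with a cons
-- accumulator, so the final list IS reversed(nibbles) and String.ofList is the final "".join(reversed(...))
def pvLoopA (ext : Int) (revNibbles : List Char) : List Char :=
  if 15 ≤ ext then pvLoopA (ext - 15) ('F' :: revNibbles) else fmtXc ext :: revNibbles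
termination_by ext.toNat
decreasing_by simp; omega

def encode_paint_color (state : Int) : String :=
  if state = 0 then ""
  else if state ≤ 2 then
    fmtX (PySem.Int.band state 1 * 4 + PySem.Int.band (state >>> 1) 1 * 8)
  else
    String.ofList (pvLoopA (state - 3) ['C'])

-- ===== PORT B =====
def encode_paint_color_alt (state : Int) : String :=
  if state = 0 then ""
  else if state ≤ 2 then
    fmtX (PySem.Int.band state 1 * 4 + PySem.Int.band (state >>> 1) 1 * 8)
  else
    let q := PySem.Int.floordiv (state - 3) 15
    let r := PySem.Int.mod (state - 3) 15
    fmtX r ++ String.ofList (List.replicate q.toNat 'F') ++ "C"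

-- ===== PRECONDITION & SPEC =====
def Spec_encode_paint_color (state : Int) (out : String) : Prop := out = encode_paint_color_alt state
instance (state : Int) (out : String) : Decidable (Spec_encode_paint_color state out) := by unfold Spec_encode_paint_color; infer_instance

-- ===== CLAIM (what is proved, stated in full; the proofs are below) =====
def Claim_equal_encode_paint_color : Prop := ∀ (state : Int), Dom_encode_paint_color state → Spec_encode_paint_color state (encode_paint_color state)

-- ===== LEMMAS AND PROOFS =====
theorem str_ext {a b : String} (h : a.toList = b.toList) : a = b := by
  rw [← a.ofList_toList, ← b.ofList_toList, h]

theorem pvLoopA_closed : ∀ (n : Nat) (ext : Int) (acc : List Char), ext.toNat = n → 0 ≤ ext →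
    pvLoopA ext acc =
      fmtXc (PySem.Int.mod ext 15) :: (List.replicate (PySem.Int.floordiv ext 15).toNat 'F' ++ acc) := by
  intro n
  induction n using Nat.strong_induction_on with
  | _ n ih =>
    intro ext acc hn hext
    rw [pvLoopA]
    by_cases h : 15 ≤ ext
    · simp only [if_pos h]
      have h15 : (0:Int) < 15 := by omega
      have hrec := ih (ext - 15).toNat (by omega) (ext - 15) ('F' :: acc) rfl (by omega)
      rw [hrec]
      have hmod : PySem.Int.mod (ext - 15) 15 = PySem.Int.mod ext 15 := by
        rw [PySem.Int.mod_eq_emod_of_pos h15, PySem.Int.mod_eq_emod_of_pos h15]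
        omega
      have hdiv : (PySem.Int.floordiv ext 15).toNat = (PySem.Int.floordiv (ext - 15) 15).toNat + 1 := by
        rw [PySem.Int.floordiv_eq_ediv_of_pos h15, PySem.Int.floordiv_eq_ediv_of_pos h15]
        omega
      rw [hmod, hdiv, List.replicate_succ']
      simp
    · simp only [if_neg h]
      have h15 : (0:Int) < 15 := by omega
      have hmod : PySem.Int.mod ext 15 = ext := by
        rw [PySem.Int.mod_eq_emod_of_pos h15]; omega
      have hdiv : (PySem.Int.floordiv ext 15).toNat = 0 := by
        rw [PySem.Int.floordiv_eq_ediv_of_pos h15]; omega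
      rw [hmod, hdiv]
      simp

-- ===== VERDICT (by name: the statement is the Claim_ definition above) =====
theorem encode_paint_color_spec : Claim_equal_encode_paint_color := by
  intro state _
  unfold Spec_encode_paint_color encode_paint_color encode_paint_color_alt
  by_cases h0 : state = 0
  · simp [h0]
  · simp only [if_neg h0]
    by_cases h2 : state ≤ 2
    · simp [h2]
    · simp only [if_neg h2]
      rw [pvLoopA_closed (state - 3).toNat (state - 3) ['C'] rfl (by omega)]
      apply str_ext
      simp [fmtX]
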